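-- pv_equiv track=rewrite | github.com/minibrasiler7/mathpully | effectuer_reduire_ordonner.py | keep_only_non_distributive_terme
-- ===== SOURCE A (Python) =====
-- def keep_only_non_distributive_terme(chaine):
--     new_chaine = ""
--     i=0
--     copier = True
--     while i<len(chaine):
--         if chaine[i] == "(":
--             copier= False
--             j=i
--             while j>=0:
--                 if chaine[j] == "+" or chaine[j] == "-":
--
--                     break
--                 else:
--                    new_chaine = new_chaine[:-1]
--                    j=j-1
--         elif chaine[i]==")":
--             copier = True
--         else:
--             if copier:
--                 new_chaine += chaine[i]
--         i+=1
--     return new_chaine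
-- ===== SOURCE B (Python) =====
-- def keep_only_non_distributive_terme(chaine):
--     out = []
--     copier = True
--     last_pm = -1  # index of the nearest '+' or '-' seen so far
--     for i, c in enumerate(chaine):
--         if c == '(':
--             copier = False
--             k = i - last_pm          # number of characters A's backward scan would delete
--             del out[-k:]             # batch truncation, k >= 1 always
--         elif c == ')':
--             copier = True
--         else:
--             if c == '+' or c == '-':
--                 last_pm = i
--             if copier:
--                 out.append(c)
--     return ''.join(out)
-- ===== Notes on version B (the rewrite author's own statement) =====
-- stated objective: faster
-- what changed: Replaces A's backward rescan at every '(' (quadratic string re-slicing new_chaine[:-1] one char at a time) by a single forward pass that tracks the index of the last '+'/'-' seen, truncating a list buffer by the whole distance at once.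
import Mathlib
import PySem

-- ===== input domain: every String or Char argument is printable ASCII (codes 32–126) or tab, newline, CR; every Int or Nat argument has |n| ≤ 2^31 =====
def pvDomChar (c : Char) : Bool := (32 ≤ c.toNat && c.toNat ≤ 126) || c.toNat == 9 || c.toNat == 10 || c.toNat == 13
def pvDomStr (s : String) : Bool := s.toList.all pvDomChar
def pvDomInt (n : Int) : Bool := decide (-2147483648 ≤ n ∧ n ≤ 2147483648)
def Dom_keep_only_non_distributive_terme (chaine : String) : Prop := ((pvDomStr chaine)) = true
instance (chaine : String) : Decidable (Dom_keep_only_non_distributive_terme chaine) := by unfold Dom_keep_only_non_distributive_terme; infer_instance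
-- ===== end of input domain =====

-- B replaces A's per-'(' backward rescan (deleting one char at a time) by a single forward
-- pass tracking the last '+'/'-' index and truncating in one step (objective: faster).

-- ===== PORT A =====
-- inner 'while j>=0: if chaine[j] in "+-": break else new_chaine=new_chaine[:-1]; j-=1',
-- with j encoded as n-1 (fuel n = j+1; n = 0 ↔ j < 0)
def pvAInner (cs : List Char) : Nat → List Char → List Char
  | 0, acc => acc
  | n+1, acc =>
    if cs.getD n ' ' = '+' ∨ cs.getD n ' ' = '-' then acc
    else pvAInner cs n acc.dropLast

-- outer 'while i<len(chaine)' loop; rest = chaine[i:]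
def pvALoop (cs : List Char) : List Char → Nat → List Char → Bool → List Char
  | [], _, acc, _ => acc
  | c :: rest', i, acc, copier =>
    if c = '(' then pvALoop cs rest' (i+1) (pvAInner cs (i+1) acc) false
    else if c = ')' then pvALoop cs rest' (i+1) acc true
    else pvALoop cs rest' (i+1) (if copier then acc ++ [c] else acc) copier

def keep_only_non_distributive_terme (chaine : String) : String :=
  String.ofList (pvALoop chaine.toList chaine.toList 0 [] true)

-- ===== PORT B =====
-- single forward pass; lastPm = index of nearest '+'/'-' seen so far (-1 if none);
-- on '(' delete the last k = i - lastPm buffered chars at once ('del out[-k:]', k ≥ 1)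
def pvBLoop : List Char → Nat → List Char → Bool → Int → List Char
  | [], _, out, _, _ => out
  | c :: rest', i, out, copier, lastPm =>
    if c = '(' then
      let k : Int := (i : Int) - lastPm
      pvBLoop rest' (i+1) (out.take (out.length - k.toNat)) false lastPm
    else if c = ')' then pvBLoop rest' (i+1) out true lastPm
    else
      pvBLoop rest' (i+1) (if copier then out ++ [c] else out) copier
        (if c = '+' ∨ c = '-' then (i : Int) else lastPm)

def keep_only_non_distributive_terme_alt (chaine : String) : String :=
  String.ofList (pvBLoop chaine.toList 0 [] true (-1))

-- ===== PRECONDITION & SPEC =====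
def Spec_keep_only_non_distributive_terme (chaine : String) (out : String) : Prop := out = keep_only_non_distributive_terme_alt chaine
instance (chaine : String) (out : String) : Decidable (Spec_keep_only_non_distributive_terme chaine out) := by unfold Spec_keep_only_non_distributive_terme; infer_instance

-- ===== CLAIM (what is proved, stated in full; the proofs are below) =====
def Claim_equal_keep_only_non_distributive_terme : Prop := ∀ (chaine : String), Dom_keep_only_non_distributive_terme chaine → Spec_keep_only_non_distributive_terme chaine (keep_only_non_distributive_terme chaine)

-- ===== LEMMAS AND PROOFS =====

-- distance from position n back to the nearest '+'/'-' strictly below n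
def pvDpm (cs : List Char) : Nat → Nat
  | 0 => 0
  | n+1 => if cs.getD n ' ' = '+' ∨ cs.getD n ' ' = '-' then 0 else pvDpm cs n + 1

theorem pvAInner_eq (cs : List Char) (n : Nat) (acc : List Char) :
    pvAInner cs n acc = acc.take (acc.length - pvDpm cs n) := by
  induction n generalizing acc with
  | zero => simp [pvAInner, pvDpm]
  | succ n ih =>
    simp only [pvAInner, pvDpm]
    split_ifs with h
    · simp
    · rw [ih, List.dropLast_eq_take, List.take_take, List.length_take]
      congr 1
      omega

theorem pvLoop_eq (cs : List Char) (rest : List Char) (i : Nat) (acc : List Char)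
    (copier : Bool) (lastPm : Int)
    (hrest : rest = cs.drop i) (hpm : lastPm = (i : Int) - 1 - (pvDpm cs i : Int)) :
    pvALoop cs rest i acc copier = pvBLoop rest i acc copier lastPm := by
  induction rest generalizing i acc copier lastPm with
  | nil => simp [pvALoop, pvBLoop]
  | cons c rest' ih =>
    have hget : cs[i]? = some c := by
      rw [← List.head?_drop, ← hrest]; rfl
    have hrest' : rest' = cs.drop (i+1) := by
      rw [← List.tail_drop, ← hrest]; rfl
    simp only [pvALoop, pvBLoop]
    by_cases h1 : c = '('
    · -- '('
      have hd : pvDpm cs (i+1) = pvDpm cs i + 1 := by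
        simp [pvDpm, List.getD, hget, h1]
      have hk : (((i : Int) - lastPm).toNat) = pvDpm cs (i+1) := by omega
      rw [if_pos h1, if_pos h1, pvAInner_eq, hk]
      exact ih _ _ _ _ hrest' (by omega)
    · rw [if_neg h1, if_neg h1]
      by_cases h2 : c = ')'
      · -- ')'
        have hd : pvDpm cs (i+1) = pvDpm cs i + 1 := by
          simp [pvDpm, List.getD, hget, h2]
        rw [if_pos h2, if_pos h2]
        exact ih _ _ _ _ hrest' (by omega)
      · -- other
        rw [if_neg h2, if_neg h2]
        by_cases hpmC : c = '+' ∨ c = '-'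
        · have hd : pvDpm cs (i+1) = 0 := by
            rcases hpmC with h | h <;> simp [pvDpm, List.getD, hget, h]
          rw [if_pos hpmC]
          exact ih _ _ _ _ hrest' (by omega)
        · have hd : pvDpm cs (i+1) = pvDpm cs i + 1 := by
            simp only [not_or] at hpmC
            simp [pvDpm, List.getD, hget, hpmC.1, hpmC.2]
          rw [if_neg hpmC]
          exact ih _ _ _ _ hrest' (by omega)

-- ===== VERDICT (by name: the statement is the Claim_ definition above) =====
theorem keep_only_non_distributive_terme_spec : Claim_equal_keep_only_non_distributive_terme := by
  intro chaine _
  unfold Spec_keep_only_non_distributive_terme keep_only_non_distributive_terme keep_only_non_distributive_terme_alt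
  rw [pvLoop_eq chaine.toList chaine.toList 0 [] true (-1) (by simp) (by simp [pvDpm])]
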